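-- pv_equiv track=rewrite | github.com/aldrodriguezca/mutant_detection | aws_lambda/mutant_lambda/service.py | check_mutant_dna
-- ===== SOURCE A (Python) =====
-- from typing import List
--
-- def check_mutant_dna(dna_matrix: List[str]) -> bool:
--     """Verifiy the DNA-sequence data in order to see if the mutant-defining criteria is met
--
--     Args:
--         dna_matrix: List[str]
--             List of strings containing DNA-strings
--
--     Returns:
--         Boolean value indicating whether the provided dna sequence (matrix)
--         corresponds to a mutant (True) or human (False).
--     """
--     repeated_seqs = 0
--     seq_len_criteria = 4
--     mutant_threshold = 1
--
--     W = range(len(dna_matrix))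
--     H = range(len(dna_matrix[0]))
--     directions = [(0, 1), (1, 0), (1, 1), (1, -1)]
--
--     dir = 0
--     repeated_seqs = 0
--
--     while dir < len(directions) and repeated_seqs <= mutant_threshold:
--         scan_path = []
--         dx, dy = directions[dir]
--         dir +=1
--
--         if dx > 0:
--             scan_path += [(0, y) for y in H]
--
--         if dy > 0:   # scanning down
--             scan_path += [(x, 0) for x in W]
--
--         if dy < 0:   # scanning up
--             scan_path += [(x, H[-1]) for x in W]
--
--         for sx, sy in scan_path:
--             seq = 0; mark = None
--             x, y = sx, sy
--
--             while x in W and y in H: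
--                 if dna_matrix[x][y] == mark:
--                     seq += 1
--                 else:
--                     mark = dna_matrix[x][y]
--                     seq = 1
--                 if mark is not None and seq >= seq_len_criteria:
--                     repeated_seqs += 1
--
--                 if repeated_seqs > mutant_threshold:
--                     return True
--                 x, y = x + dx, y + dy
--
--     return repeated_seqs > mutant_threshold
-- ===== SOURCE B (Python) =====
-- from typing import Iterator, List, Tuple
--
-- def _credit(line: List[str]) -> int:
--     """Run-length encode the line, then give each maximal run of length n a credit of max(0, n - 3)."""
--     runs: List[Tuple[str, int]] = []
--     for ch in line:
--         if runs and runs[-1][0] == ch: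
--             runs[-1] = (ch, runs[-1][1] + 1)
--         else:
--             runs.append((ch, 1))
--     return sum(max(0, n - 3) for _, n in runs)
--
-- def _lines(dna_matrix: List[str], h: int, w: int) -> Iterator[List[str]]:
--     """All scan lines: rows, columns, then both diagonal families (starts: top row, then left/right column)."""
--     for r in range(h):                                   # rows
--         yield [dna_matrix[r][c] for c in range(w)]
--     for c in range(w):                                   # columns
--         yield [dna_matrix[r][c] for r in range(h)]
--     for r, c in [(0, c) for c in range(w)] + [(r, 0) for r in range(h)]:
--         line = []                                         # down-right diagonals
--         while r < h and c < w:
--             line.append(dna_matrix[r][c]); r += 1; c += 1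
--         yield line
--     for r, c in [(0, c) for c in range(w)] + [(r, w - 1) for r in range(h)]:
--         line = []                                         # down-left diagonals
--         while r < h and 0 <= c:
--             line.append(dna_matrix[r][c]); r += 1; c -= 1
--         yield line
--
-- def check_mutant_dna(dna_matrix: List[str]) -> bool:
--     count = 0
--     for line in _lines(dna_matrix, len(dna_matrix), len(dna_matrix[0])):
--         count += _credit(line)
--         if count > 1:
--             return True
--     return count > 1
-- ===== Notes on version B (the rewrite author's own statement) =====
-- stated objective: simpler
-- what changed: A interleaves a per-cell run state machine (seq/mark/count with early returns) into a direction-vector scan over start points; B first enumerates the scan lines (rows, columns, both diagonal families) as plain lists, then run-length-encodes each line and credits max(0, run-3) per maximal run.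
-- outside the precondition, e.g. on check_mutant_dna(['AAAABC', 'AAAAA']): A returns True, B raises IndexError
import Mathlib
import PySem

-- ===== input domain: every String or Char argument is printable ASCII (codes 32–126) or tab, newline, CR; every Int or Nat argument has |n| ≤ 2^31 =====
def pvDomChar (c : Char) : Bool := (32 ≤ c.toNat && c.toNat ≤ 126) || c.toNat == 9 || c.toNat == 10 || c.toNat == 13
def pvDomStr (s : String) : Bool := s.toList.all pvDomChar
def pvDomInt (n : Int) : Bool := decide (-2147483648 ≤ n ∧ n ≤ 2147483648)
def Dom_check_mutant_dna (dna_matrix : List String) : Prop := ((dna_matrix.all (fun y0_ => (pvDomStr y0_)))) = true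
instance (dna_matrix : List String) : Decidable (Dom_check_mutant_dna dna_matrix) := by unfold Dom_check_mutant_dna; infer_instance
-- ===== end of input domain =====

-- B replaces A's direction/state-machine scan (per-cell run counter, early returns) by a plain
-- "enumerate every scan line, run-length-encode it, credit max(0, run-3) per run" decomposition (objective: simpler; same cost).

-- ===== PORT A =====
-- dna_matrix[x][y] (in range under Pre_; the getD defaults are never reached there)
def pvAcell (m : List String) (x y : Int) : Char :=
  (PySem.Str.pyGet? ((PySem.List.pyGet? m x).getD "") y).getD ' '

-- fuel bounding the number of steps of A's inner `while x in W and y in H` walk (≤ h resp. w steps)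
def pvAfuel (h w : Int) : Nat := h.toNat + w.toNat + 1

-- the inner while loop: run-machine over the walked cells; `none` = the `return True` inside it
def pvAwalk (m : List String) (h w dx dy : Int) : Nat → Int → Int → Int → Option Char → Int → Option Int
  | 0, _, _, _, _, count => some count
  | fuel+1, x, y, seq, mark, count =>
    if 0 ≤ x ∧ x < h ∧ 0 ≤ y ∧ y < w then
      let ch := pvAcell m x y
      let seq' := if mark == some ch then seq + 1 else 1
      let mark' := if mark == some ch then mark else some ch
      let count' := if mark'.isSome ∧ 4 ≤ seq' then count + 1 else count
      if 1 < count' then none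
      else pvAwalk m h w dx dy fuel (x + dx) (y + dy) seq' mark' count'
    else some count

-- the `for sx, sy in scan_path` loop
def pvAscan (m : List String) (h w dx dy : Int) : List (Int × Int) → Int → Option Int
  | [], count => some count
  | (sx, sy) :: rest, count =>
    match pvAwalk m h w dx dy (pvAfuel h w) sx sy 0 none count with
    | none => none
    | some c' => pvAscan m h w dx dy rest c'

-- scan_path built from the three `if` blocks (H[-1] as in Python: pyGet? of the range at -1)
def pvApath (h w dx dy : Int) : List (Int × Int) :=
  (if 0 < dx then (PySem.List.pyRange 0 w).map (fun y => ((0:Int), y)) else [])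
  ++ (if 0 < dy then (PySem.List.pyRange 0 h).map (fun x => (x, (0:Int))) else [])
  ++ (if dy < 0 then (PySem.List.pyRange 0 h).map
        (fun x => (x, (PySem.List.pyGet? (PySem.List.pyRange 0 w) (-1)).getD 0)) else [])

-- the outer `while dir < len(directions) and repeated_seqs <= mutant_threshold` loop
def pvAdirs (m : List String) (h w : Int) : List (Int × Int) → Int → Bool
  | [], count => decide (1 < count)
  | (dx, dy) :: rest, count =>
    if count ≤ 1 then
      match pvAscan m h w dx dy (pvApath h w dx dy) count with
      | none => true
      | some c' => pvAdirs m h w rest c'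
    else decide (1 < count)

def check_mutant_dna (dna_matrix : List String) : Bool :=
  pvAdirs dna_matrix (dna_matrix.length : Int)
    (PySem.Str.len ((PySem.List.pyGet? dna_matrix 0).getD ""))
    [(0, 1), (1, 0), (1, 1), (1, -1)] 0

-- ===== PORT B =====
def pvBcell (m : List String) (r c : Int) : Char :=
  (PySem.Str.pyGet? ((PySem.List.pyGet? m r).getD "") c).getD ' '

def pvBrow (m : List String) (w r : Int) : List Char :=
  (PySem.List.pyRange 0 w).map (fun c => pvBcell m r c)

def pvBcol (m : List String) (h c : Int) : List Char :=
  (PySem.List.pyRange 0 h).map (fun r => pvBcell m r c)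

def pvBfuel (h w : Int) : Nat := h.toNat + w.toNat + 1

def pvBdiagDR (m : List String) (h w : Int) : Nat → Int → Int → List Char
  | 0, _, _ => []
  | fuel+1, r, c =>
    if r < h ∧ c < w then pvBcell m r c :: pvBdiagDR m h w fuel (r + 1) (c + 1) else []

def pvBdiagDL (m : List String) (h w : Int) : Nat → Int → Int → List Char
  | 0, _, _ => []
  | fuel+1, r, c =>
    if r < h ∧ 0 ≤ c then pvBcell m r c :: pvBdiagDL m h w fuel (r + 1) (c - 1) else []

-- _lines: rows, columns, down-right diagonals, down-left diagonals (starts: top row, then left/right column)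
def pvBlines (m : List String) (h w : Int) : List (List Char) :=
  (PySem.List.pyRange 0 h).map (fun r => pvBrow m w r)
  ++ (PySem.List.pyRange 0 w).map (fun c => pvBcol m h c)
  ++ ((PySem.List.pyRange 0 w).map (fun c => ((0:Int), c))
      ++ (PySem.List.pyRange 0 h).map (fun r => (r, (0:Int)))).map
       (fun p => pvBdiagDR m h w (pvBfuel h w) p.1 p.2)
  ++ ((PySem.List.pyRange 0 w).map (fun c => ((0:Int), c))
      ++ (PySem.List.pyRange 0 h).map (fun r => (r, w - 1))).map
       (fun p => pvBdiagDL m h w (pvBfuel h w) p.1 p.2)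

-- run-length encoding of a line (the `runs` loop of _credit: update runs[-1] or append)
def pvBruns (line : List Char) : List (Char × Int) :=
  line.foldl (fun runs ch =>
    match runs.getLast? with
    | some (c, n) => if c == ch then runs.dropLast ++ [(ch, n + 1)] else runs ++ [(ch, 1)]
    | none => runs ++ [(ch, 1)]) []

def pvBcredit (line : List Char) : Int :=
  ((pvBruns line).map (fun p => max 0 (p.2 - 3))).sum

-- `for line in _lines(...)` with the early `return True`
def pvBloop : List (List Char) → Int → Bool
  | [], count => decide (1 < count)
  | l :: rest, count =>
    let c' := count + pvBcredit l
    if 1 < c' then true else pvBloop rest c'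

def check_mutant_dna_alt (dna_matrix : List String) : Bool :=
  pvBloop (pvBlines dna_matrix (dna_matrix.length : Int)
    (PySem.Str.len ((PySem.List.pyGet? dna_matrix 0).getD ""))) 0

-- ===== PRECONDITION & SPEC =====
-- Pre_ excludes exactly the inputs on which A raises IndexError — the empty matrix, an empty first
-- row, or a row shorter than the first row; on a few such ragged matrices A still returns True
-- because two repeats occur in scan order before the short row is read (B raises there too, but
-- possibly at a different cell), so those accidental returns are excluded with the crashes.
def Pre_check_mutant_dna (dna_matrix : List String) : Prop :=
  dna_matrix ≠ [] ∧
  0 < PySem.Str.len ((PySem.List.pyGet? dna_matrix 0).getD "") ∧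
  ∀ s ∈ dna_matrix, PySem.Str.len ((PySem.List.pyGet? dna_matrix 0).getD "") ≤ PySem.Str.len s
instance (dna_matrix : List String) : Decidable (Pre_check_mutant_dna dna_matrix) := by
  unfold Pre_check_mutant_dna; infer_instance

def pvWitness_check_mutant_dna : List String := ["AC", "CA"]

def Spec_check_mutant_dna (dna_matrix : List String) (out : Bool) : Prop := out = check_mutant_dna_alt dna_matrix
instance (dna_matrix : List String) (out : Bool) : Decidable (Spec_check_mutant_dna dna_matrix out) := by unfold Spec_check_mutant_dna; infer_instance

-- ===== CLAIM (what is proved, stated in full; the proofs are below) =====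
def Claim_equal_check_mutant_dna : Prop := ∀ (dna_matrix : List String), Dom_check_mutant_dna dna_matrix → Pre_check_mutant_dna dna_matrix → Spec_check_mutant_dna dna_matrix (check_mutant_dna dna_matrix)

-- ===== LEMMAS AND PROOFS =====

-- the cells A's walk visits, as a list (ghost definition for the proof)
def pvExtract (m : List String) (h w dx dy : Int) : Nat → Int → Int → List Char
  | 0, _, _ => []
  | f+1, x, y =>
    if 0 ≤ x ∧ x < h ∧ 0 ≤ y ∧ y < w then
      pvAcell m x y :: pvExtract m h w dx dy f (x + dx) (y + dy)
    else []

-- A's run machine over a char list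
def pvMach : List Char → Int → Option Char → Int → Option Int
  | [], _, _, count => some count
  | ch :: t, seq, mark, count =>
    let seq' := if mark == some ch then seq + 1 else 1
    let mark' := if mark == some ch then mark else some ch
    let count' := if mark'.isSome ∧ 4 ≤ seq' then count + 1 else count
    if 1 < count' then none
    else pvMach t seq' mark' count'

-- pure per-cell credit of the machine from state (k, mch)
def pvAdd : Int → Char → List Char → Int
  | _, _, [] => 0
  | k, mch, ch :: t =>
    if mch == ch then (if 4 ≤ k + 1 then 1 else 0) + pvAdd (k + 1) mch t
    else pvAdd 1 ch t

-- run-length encoding continued from a pending run (mch, n)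
def pvRunsC (mch : Char) (n : Int) : List Char → List (Char × Int)
  | [] => [(mch, n)]
  | ch :: t => if mch == ch then pvRunsC mch (n + 1) t else (mch, n) :: pvRunsC ch 1 t

def pvCreditOf (rs : List (Char × Int)) : Int := (rs.map (fun p => max 0 (p.2 - 3))).sum

-- canonical accumulator loop both ports reduce to
def pvGo : List (List Char) → Int → Option Int
  | [], c => some c
  | l :: rest, c =>
    let c' := c + pvBcredit l
    if 1 < c' then none else pvGo rest c'

theorem pvAwalk_eq_mach (m : List String) (h w dx dy : Int) :
    ∀ (f : Nat) (x y seq : Int) (mark : Option Char) (count : Int),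
    pvAwalk m h w dx dy f x y seq mark count
      = pvMach (pvExtract m h w dx dy f x y) seq mark count := by
  intro f
  induction f with
  | zero => intro x y seq mark count; simp [pvAwalk, pvExtract, pvMach]
  | succ f ih =>
    intro x y seq mark count
    simp only [pvAwalk, pvExtract]
    split
    · simp only [pvMach]
      repeat' split
      all_goals first | rfl | exact ih _ _ _ _ _
    · simp [pvMach]

theorem pvAdd_nonneg : ∀ (t : List Char) (k : Int) (mch : Char), 0 ≤ pvAdd k mch t := by
  intro t
  induction t with
  | nil => intro k mch; simp [pvAdd]
  | cons ch t ih =>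
    intro k mch
    simp only [pvAdd]
    split
    · have := ih (k + 1) mch
      split <;> omega
    · exact ih 1 ch

theorem pvMach_eq_add : ∀ (t : List Char) (k : Int) (mch : Char) (count : Int),
    0 ≤ count → count ≤ 1 →
    pvMach t k (some mch) count
      = if 1 < count + pvAdd k mch t then none else some (count + pvAdd k mch t) := by
  intro t
  induction t with
  | nil =>
    intro k mch count h0 h1
    simp only [pvMach, pvAdd]
    rw [if_neg (by omega)]
    simp
  | cons ch t ih =>
    intro k mch count h0 h1
    have hnn1 := pvAdd_nonneg t (k + 1) mch
    have hnn2 := pvAdd_nonneg t 1 ch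
    simp only [pvMach, pvAdd]
    by_cases hbe : mch = ch
    · subst hbe
      simp only [beq_self_eq_true, if_true, Option.isSome_some, true_and]
      by_cases h4 : (4 : Int) ≤ k + 1
      · simp only [if_pos h4]
        by_cases hc : (1 : Int) < count + 1
        · rw [if_pos hc, if_pos (by omega)]
        · rw [if_neg hc, ih _ _ _ (by omega) (by omega)]
          have harr : count + 1 + pvAdd (k + 1) mch t = count + (1 + pvAdd (k + 1) mch t) := by ring
          rw [harr]
      · simp only [if_neg h4]
        rw [if_neg (by omega), ih _ _ _ h0 h1]
        simp
    · have hb1 : ((some mch : Option Char) == some ch) = false := by simpa using hbe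
      have hb2 : (mch == ch) = false := by simpa using hbe
      simp only [hb1, hb2, Bool.false_eq_true, if_false, Option.isSome_some, true_and]
      rw [if_neg (by omega), if_neg (by norm_num : ¬ (4:Int) ≤ 1), ih _ _ _ h0 h1]

theorem pvAdd_eq_runs : ∀ (t : List Char) (k : Int) (mch : Char), 0 ≤ k →
    pvAdd k mch t = pvCreditOf (pvRunsC mch k t) - max 0 (k - 3) := by
  intro t
  induction t with
  | nil => intro k mch hk; simp [pvAdd, pvRunsC, pvCreditOf]
  | cons ch t ih =>
    intro k mch hk
    simp only [pvAdd, pvRunsC]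
    by_cases hbe : mch = ch
    · subst hbe
      simp only [beq_self_eq_true, if_true]
      rw [ih (k + 1) mch (by omega)]
      have hd : (if (4:Int) ≤ k + 1 then (1:Int) else 0) = max 0 (k + 1 - 3) - max 0 (k - 3) := by
        simp only [max_def]
        split_ifs <;> omega
      rw [hd]; ring
    · have hb2 : (mch == ch) = false := by simpa using hbe
      simp only [hb2, Bool.false_eq_true, if_false]
      rw [ih 1 ch (by omega)]
      simp only [pvCreditOf, List.map_cons, List.sum_cons]
      have : max (0:Int) (1 - 3) = 0 := by omega
      rw [this]
      have h3 : max (0:Int) (k - 3) ≤ max 0 (k - 3) := le_refl _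
      omega

theorem pvBruns_fold : ∀ (t : List Char) (rs : List (Char × Int)) (mch : Char) (n : Int),
    t.foldl (fun runs ch =>
      match runs.getLast? with
      | some (c, n) => if c == ch then runs.dropLast ++ [(ch, n + 1)] else runs ++ [(ch, 1)]
      | none => runs ++ [(ch, 1)]) (rs ++ [(mch, n)])
      = rs ++ pvRunsC mch n t := by
  intro t
  induction t with
  | nil => intro rs mch n; simp [pvRunsC]
  | cons ch t ih =>
    intro rs mch n
    simp only [List.foldl_cons, List.getLast?_concat, List.dropLast_concat, pvRunsC]
    by_cases hbe : mch = ch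
    · subst hbe
      simp only [beq_self_eq_true, if_true]
      exact ih rs mch (n + 1)
    · have hb2 : (mch == ch) = false := by simpa using hbe
      simp only [hb2, Bool.false_eq_true, if_false]
      rw [ih (rs ++ [(mch, n)]) ch 1]
      simp

theorem pvMach_fresh (l : List Char) (count : Int) (h0 : 0 ≤ count) (h1 : count ≤ 1) :
    pvMach l 0 none count
      = if 1 < count + pvBcredit l then none else some (count + pvBcredit l) := by
  cases l with
  | nil =>
    simp only [pvMach, pvBcredit, pvBruns, List.foldl_nil, List.map_nil, List.sum_nil]
    rw [if_neg (by omega)]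
    simp
  | cons ch t =>
    simp only [pvMach]
    have hb : ((none : Option Char) == some ch) = false := rfl
    simp only [hb, Bool.false_eq_true, if_false, Option.isSome_some, true_and,
      if_neg (by norm_num : ¬ (4:Int) ≤ 1), if_neg (show ¬ (1:Int) < count from by omega)]
    rw [pvMach_eq_add t 1 ch count h0 h1, pvAdd_eq_runs t 1 ch (by omega)]
    have hruns0 : pvBruns (ch :: t) = pvRunsC ch 1 t := by
      unfold pvBruns
      rw [List.foldl_cons]
      exact pvBruns_fold t [] ch 1
    have hruns : pvBcredit (ch :: t) = pvCreditOf (pvRunsC ch 1 t) := by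
      unfold pvBcredit pvCreditOf
      rw [hruns0]
    rw [hruns]
    have : max (0:Int) (1 - 3) = 0 := by omega
    rw [this]
    ring_nf

theorem pvBcredit_nonneg (l : List Char) : 0 ≤ pvBcredit l := by
  unfold pvBcredit
  apply List.sum_nonneg
  intro x hx
  rcases List.mem_map.mp hx with ⟨p, _, rfl⟩
  exact le_max_left _ _

theorem pvGo_bounds : ∀ (ls : List (List Char)) (c c' : Int), 0 ≤ c → c ≤ 1 →
    pvGo ls c = some c' → 0 ≤ c' ∧ c' ≤ 1 := by
  intro ls
  induction ls with
  | nil => intro c c' h0 h1 h; simp [pvGo] at h; omega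
  | cons l rest ih =>
    intro c c' h0 h1 h
    simp only [pvGo] at h
    split at h
    · exact absurd h (by simp)
    · exact ih _ _ (by have := pvBcredit_nonneg l; omega) (by omega) h

theorem pvAscan_eq_go (m : List String) (h w dx dy : Int) :
    ∀ (path : List (Int × Int)) (c : Int), 0 ≤ c → c ≤ 1 →
    pvAscan m h w dx dy path c
      = pvGo (path.map (fun p => pvExtract m h w dx dy (pvAfuel h w) p.1 p.2)) c := by
  intro path
  induction path with
  | nil => intro c h0 h1; simp [pvAscan, pvGo]
  | cons p rest ih =>
    intro c h0 h1
    obtain ⟨sx, sy⟩ := p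
    simp only [pvAscan, List.map_cons, pvGo]
    rw [pvAwalk_eq_mach, pvMach_fresh _ c h0 h1]
    by_cases hc : 1 < c + pvBcredit (pvExtract m h w dx dy (pvAfuel h w) sx sy)
    · rw [if_pos hc, if_pos hc]
    · rw [if_neg hc, if_neg hc]
      exact ih _ (by have := pvBcredit_nonneg (pvExtract m h w dx dy (pvAfuel h w) sx sy); omega)
        (by omega)

theorem pvGo_append : ∀ (xs ys : List (List Char)) (c : Int),
    pvGo (xs ++ ys) c = match pvGo xs c with
      | none => none
      | some c' => pvGo ys c' := by
  intro xs
  induction xs with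
  | nil => intro ys c; simp [pvGo]
  | cons l rest ih =>
    intro ys c
    simp only [pvGo, List.cons_append]
    split
    · rfl
    · exact ih ys _

theorem pvAdirs_eq_go (m : List String) (h w : Int) :
    ∀ (dirs : List (Int × Int)) (c : Int), 0 ≤ c → c ≤ 1 →
    pvAdirs m h w dirs c
      = (match pvGo (dirs.flatMap (fun d =>
          (pvApath h w d.1 d.2).map
            (fun p => pvExtract m h w d.1 d.2 (pvAfuel h w) p.1 p.2))) c with
         | none => true
         | some c' => decide (1 < c')) := by
  intro dirs
  induction dirs with
  | nil => intro c h0 h1; simp [pvAdirs, pvGo]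
  | cons d rest ih =>
    intro c h0 h1
    obtain ⟨dx, dy⟩ := d
    simp only [pvAdirs, List.flatMap_cons]
    rw [if_pos (show c ≤ 1 from h1)]
    rw [pvAscan_eq_go m h w dx dy _ c h0 h1, pvGo_append]
    cases hres : pvGo ((pvApath h w dx dy).map
        (fun p => pvExtract m h w dx dy (pvAfuel h w) p.1 p.2)) c with
    | none => rfl
    | some c' =>
      obtain ⟨hc0, hc1⟩ := pvGo_bounds _ _ _ h0 h1 hres
      exact ih c' hc0 hc1

theorem pvExtract_row (m : List String) (h w x : Int) (hx0 : 0 ≤ x) (hxh : x < h) :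
    ∀ (f : Nat) (y : Int), (w - y).toNat ≤ f → 0 ≤ y →
    pvExtract m h w 0 1 f x y = (PySem.List.pyRange y w).map (fun c => pvAcell m x c) := by
  intro f
  induction f with
  | zero =>
    intro y hf hy
    rw [PySem.List.pyRange_one_eq_nil (by omega)]
    simp [pvExtract]
  | succ f ihf =>
    intro y hf hy
    by_cases hyw : y < w
    · rw [PySem.List.pyRange_one_cons hyw]
      simp only [pvExtract, List.map_cons]
      rw [if_pos ⟨hx0, hxh, hy, hyw⟩]
      congr 1
      rw [show x + (0:Int) = x by ring]
      exact ihf (y + 1) (by omega) (by omega)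
    · rw [PySem.List.pyRange_one_eq_nil (by omega)]
      simp only [pvExtract, List.map_nil]
      rw [if_neg (by omega)]

theorem pvExtract_col (m : List String) (h w y : Int) (hy0 : 0 ≤ y) (hyw : y < w) :
    ∀ (f : Nat) (x : Int), (h - x).toNat ≤ f → 0 ≤ x →
    pvExtract m h w 1 0 f x y = (PySem.List.pyRange x h).map (fun r => pvAcell m r y) := by
  intro f
  induction f with
  | zero =>
    intro x hf hx
    rw [PySem.List.pyRange_one_eq_nil (by omega)]
    simp [pvExtract]
  | succ f ihf =>
    intro x hf hx
    by_cases hxh : x < h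
    · rw [PySem.List.pyRange_one_cons hxh]
      simp only [pvExtract, List.map_cons]
      rw [if_pos ⟨hx, hxh, hy0, hyw⟩]
      congr 1
      rw [show y + (0:Int) = y by ring]
      exact ihf (x + 1) (by omega) (by omega)
    · rw [PySem.List.pyRange_one_eq_nil (by omega)]
      simp only [pvExtract, List.map_nil]
      rw [if_neg (by omega)]

theorem pvExtract_dr (m : List String) (h w : Int) :
    ∀ (f : Nat) (x y : Int), 0 ≤ x → 0 ≤ y →
    pvExtract m h w 1 1 f x y = pvBdiagDR m h w f x y := by
  intro f
  induction f with
  | zero => intro x y _ _; rfl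
  | succ f ihf =>
    intro x y hx hy
    simp only [pvExtract, pvBdiagDR, pvAcell, pvBcell]
    by_cases hg : x < h ∧ y < w
    · rw [if_pos ⟨hx, hg.1, hy, hg.2⟩, if_pos hg]
      congr 1
      exact ihf (x + 1) (y + 1) (by omega) (by omega)
    · rw [if_neg (by omega), if_neg hg]

theorem pvExtract_dl (m : List String) (h w : Int) :
    ∀ (f : Nat) (x y : Int), 0 ≤ x → y < w →
    pvExtract m h w 1 (-1) f x y = pvBdiagDL m h w f x y := by
  intro f
  induction f with
  | zero => intro x y _ _; rfl
  | succ f ihf =>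
    intro x y hx hy
    simp only [pvExtract, pvBdiagDL, pvAcell, pvBcell]
    by_cases hg : x < h ∧ 0 ≤ y
    · rw [if_pos ⟨hx, hg.1, hg.2, hy⟩, if_pos hg]
      congr 1
      exact ihf (x + 1) (y - 1) (by omega) (by omega)
    · rw [if_neg (by omega), if_neg hg]

theorem pvBloop_eq_go : ∀ (ls : List (List Char)) (c : Int),
    pvBloop ls c = (match pvGo ls c with
      | none => true
      | some c' => decide (1 < c')) := by
  intro ls
  induction ls with
  | nil => intro c; simp [pvBloop, pvGo]
  | cons l rest ih =>
    intro c
    simp only [pvBloop, pvGo]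
    split
    · rfl
    · exact ih _

-- ===== VERDICT (by name: the statement is the Claim_ definition above) =====
theorem pvLines_eq (m : List String) (h w : Int) (hw0 : 0 < w) :
    ([((0:Int),(1:Int)), (1,0), (1,1), (1,-1)]).flatMap (fun d =>
        (pvApath h w d.1 d.2).map
          (fun p => pvExtract m h w d.1 d.2 (pvAfuel h w) p.1 p.2))
      = pvBlines m h w := by
  have hlast : (PySem.List.pyGet? (PySem.List.pyRange 0 w) (-1)).getD 0 = w - 1 := by
    rw [PySem.List.pyGet?_neg_one, show w = (w - 1) + 1 by ring,
      PySem.List.pyRange_one_succ_right (by omega), List.getLast?_concat]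
    simp
  have H1 : (PySem.List.pyRange 0 h).map
        ((fun p => pvExtract m h w 0 1 (pvAfuel h w) p.1 p.2) ∘ (fun x => (x, (0:Int))))
      = (PySem.List.pyRange 0 h).map (fun r => pvBrow m w r) := by
    apply List.map_congr_left
    intro x hx
    obtain ⟨hx0, hxh⟩ := PySem.List.mem_pyRange_one.mp hx
    show pvExtract m h w 0 1 (pvAfuel h w) x 0 = pvBrow m w x
    rw [pvExtract_row m h w x hx0 hxh (pvAfuel h w) 0 (by unfold pvAfuel; omega) le_rfl]
    simp [pvBrow, pvAcell, pvBcell]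
  have H2 : (PySem.List.pyRange 0 w).map
        ((fun p => pvExtract m h w 1 0 (pvAfuel h w) p.1 p.2) ∘ (fun y => ((0:Int), y)))
      = (PySem.List.pyRange 0 w).map (fun c => pvBcol m h c) := by
    apply List.map_congr_left
    intro y hy
    obtain ⟨hy0, hyw⟩ := PySem.List.mem_pyRange_one.mp hy
    show pvExtract m h w 1 0 (pvAfuel h w) 0 y = pvBcol m h y
    rw [pvExtract_col m h w y hy0 hyw (pvAfuel h w) 0 (by unfold pvAfuel; omega) le_rfl]
    simp [pvBcol, pvAcell, pvBcell]
  have H3a : (PySem.List.pyRange 0 w).map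
        ((fun p => pvExtract m h w 1 1 (pvAfuel h w) p.1 p.2) ∘ (fun y => ((0:Int), y)))
      = (PySem.List.pyRange 0 w).map
        ((fun p => pvBdiagDR m h w (pvBfuel h w) p.1 p.2) ∘ (fun c => ((0:Int), c))) := by
    apply List.map_congr_left
    intro y hy
    obtain ⟨hy0, _⟩ := PySem.List.mem_pyRange_one.mp hy
    exact pvExtract_dr m h w (pvAfuel h w) 0 y le_rfl hy0
  have H3b : (PySem.List.pyRange 0 h).map
        ((fun p => pvExtract m h w 1 1 (pvAfuel h w) p.1 p.2) ∘ (fun x => (x, (0:Int))))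
      = (PySem.List.pyRange 0 h).map
        ((fun p => pvBdiagDR m h w (pvBfuel h w) p.1 p.2) ∘ (fun r => (r, (0:Int)))) := by
    apply List.map_congr_left
    intro x hx
    obtain ⟨hx0, _⟩ := PySem.List.mem_pyRange_one.mp hx
    exact pvExtract_dr m h w (pvAfuel h w) x 0 hx0 le_rfl
  have H4a : (PySem.List.pyRange 0 w).map
        ((fun p => pvExtract m h w 1 (-1) (pvAfuel h w) p.1 p.2) ∘ (fun y => ((0:Int), y)))
      = (PySem.List.pyRange 0 w).map
        ((fun p => pvBdiagDL m h w (pvBfuel h w) p.1 p.2) ∘ (fun c => ((0:Int), c))) := by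
    apply List.map_congr_left
    intro y hy
    obtain ⟨hy0, hyw⟩ := PySem.List.mem_pyRange_one.mp hy
    exact pvExtract_dl m h w (pvAfuel h w) 0 y le_rfl hyw
  have H4b : (PySem.List.pyRange 0 h).map
        ((fun p => pvExtract m h w 1 (-1) (pvAfuel h w) p.1 p.2) ∘ (fun x => (x, w - 1)))
      = (PySem.List.pyRange 0 h).map
        ((fun p => pvBdiagDL m h w (pvBfuel h w) p.1 p.2) ∘ (fun r => (r, w - 1))) := by
    apply List.map_congr_left
    intro x hx
    obtain ⟨hx0, _⟩ := PySem.List.mem_pyRange_one.mp hx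
    exact pvExtract_dl m h w (pvAfuel h w) x (w - 1) hx0 (by omega)
  simp only [List.flatMap_cons, List.flatMap_nil, List.append_nil, pvApath]
  norm_num
  rw [hlast]
  conv_rhs => simp only [pvBlines, List.map_append, List.map_map, List.append_assoc]
  rw [H1, H2, H3a, H3b, H4a, H4b]

theorem check_mutant_dna_spec : Claim_equal_check_mutant_dna := by
  intro m hD hP
  unfold Spec_check_mutant_dna check_mutant_dna check_mutant_dna_alt
  obtain ⟨hne, hw0, hrows⟩ := hP
  rw [pvAdirs_eq_go m _ _ _ 0 le_rfl (by norm_num), pvBloop_eq_go]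
  rw [pvLines_eq m _ _ hw0]
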